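-- pv_equiv track=rewrite | github.com/shaymoshe-vayyar/myFoodsNutrition | USDAParsing.py | string_convert_to_search
-- ===== SOURCE A (Python) =====
-- def string_convert_to_search(str_inp : str,
--                              flag_sort : bool = True,
--                              sort_order_up_ndown : bool = False):
--     str_lower = str_inp.lower()
--     str_no_special = str_lower.replace(',',' ').replace('-',' ').replace('_',' ').replace('(',' ').replace(')',' ')
--     arr_words = str_no_special.split(' ')
--     arr_words_no_empty = []
--     for word in arr_words:
--         if (len(word)>0):
--             arr_words_no_empty.append(word)
--     if (flag_sort):
--         arr_words_no_empty.sort(reverse=sort_order_up_ndown)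
--
--     return '_'.join(arr_words_no_empty)
-- ===== SOURCE B (Python) =====
-- def string_convert_to_search(str_inp: str,
--                              flag_sort: bool = True,
--                              sort_order_up_ndown: bool = False):
--     seps = {',', '-', '_', '(', ')', ' '}
--     words = []
--     buf = ''
--     for ch in str_inp.lower():
--         if ch in seps:
--             if buf:
--                 words.append(buf)
--                 buf = ''
--         else:
--             buf += ch
--     if buf:
--         words.append(buf)
--     if flag_sort:
--         words.sort(reverse=sort_order_up_ndown)
--     return '_'.join(words)
-- ===== Notes on version B (the rewrite author's own statement) =====
-- stated objective: alternative
-- what changed: Replaced the five-pass replace-chain plus split plus filter loop with a single-pass character scan that buffers the current word and flushes it on any of the six separator characters.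
import Mathlib
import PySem

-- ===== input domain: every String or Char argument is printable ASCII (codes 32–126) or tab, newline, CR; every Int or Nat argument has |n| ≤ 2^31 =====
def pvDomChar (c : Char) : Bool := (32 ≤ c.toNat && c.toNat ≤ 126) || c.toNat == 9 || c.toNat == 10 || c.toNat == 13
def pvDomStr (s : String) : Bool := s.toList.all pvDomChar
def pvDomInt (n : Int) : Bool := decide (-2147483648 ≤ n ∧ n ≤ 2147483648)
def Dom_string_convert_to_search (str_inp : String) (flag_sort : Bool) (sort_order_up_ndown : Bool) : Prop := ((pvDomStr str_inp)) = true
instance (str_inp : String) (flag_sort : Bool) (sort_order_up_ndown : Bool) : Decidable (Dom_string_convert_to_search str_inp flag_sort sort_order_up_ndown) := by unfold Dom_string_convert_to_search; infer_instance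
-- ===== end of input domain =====

-- B replaces A's five-pass replace-chain + split + filter with a single-pass buffered scan; alternative decomposition, same cost.

-- ===== PORT A =====
def string_convert_to_search (str_inp : String) (flag_sort : Bool) (sort_order_up_ndown : Bool) : String :=
  let str_lower := PySem.Str.lower str_inp
  let str_no_special :=
    PySem.Str.replace (PySem.Str.replace (PySem.Str.replace (PySem.Str.replace
      (PySem.Str.replace str_lower "," " ") "-" " ") "_" " ") "(" " ") ")" " "
  -- s.split(' ') with the nonempty literal separator never raises: Chars.splitOn is split?'s value
  let arr_words : List String := (PySem.Chars.splitOn str_no_special.toList " ".toList).map String.ofList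
  let arr_words_no_empty : List String :=
    arr_words.foldl (fun acc word => if 0 < PySem.Str.len word then acc ++ [word] else acc) []
  let result := if flag_sort then PySem.List.sorted arr_words_no_empty (fun w => w) sort_order_up_ndown
                else arr_words_no_empty
  PySem.Str.join "_" result

-- ===== PORT B =====
def pvIsSep (c : Char) : Bool :=
  c = ',' || c = '-' || c = '_' || c = '(' || c = ')' || c = ' '

def pvStep (st : List (List Char) × List Char) (ch : Char) : List (List Char) × List Char :=
  if pvIsSep ch then (if st.2 ≠ [] then (st.1 ++ [st.2], []) else (st.1, []))
  else (st.1, st.2 ++ [ch])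

def string_convert_to_search_alt (str_inp : String) (flag_sort : Bool) (sort_order_up_ndown : Bool) : String :=
  let st := (PySem.Str.lower str_inp).toList.foldl pvStep ([], [])
  let words : List String := (st.1 ++ (if st.2 ≠ [] then [st.2] else [])).map String.ofList
  let words := if flag_sort then PySem.List.sorted words (fun w => w) sort_order_up_ndown else words
  PySem.Str.join "_" words

-- ===== PRECONDITION & SPEC =====
def Spec_string_convert_to_search (str_inp : String) (flag_sort : Bool) (sort_order_up_ndown : Bool) (out : String) : Prop := out = string_convert_to_search_alt str_inp flag_sort sort_order_up_ndown
instance (str_inp : String) (flag_sort : Bool) (sort_order_up_ndown : Bool) (out : String) : Decidable (Spec_string_convert_to_search str_inp flag_sort sort_order_up_ndown out) := by unfold Spec_string_convert_to_search; infer_instance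

-- ===== CLAIM (what is proved, stated in full; the proofs are below) =====
def Claim_equal_string_convert_to_search : Prop := ∀ (str_inp : String) (flag_sort : Bool) (sort_order_up_ndown : Bool), Dom_string_convert_to_search str_inp flag_sort sort_order_up_ndown → Spec_string_convert_to_search str_inp flag_sort sort_order_up_ndown (string_convert_to_search str_inp flag_sort sort_order_up_ndown)

-- ===== LEMMAS AND PROOFS =====

-- single-character replace is a map
lemma replace_go_single (o n : Char) : ∀ (l : List Char) (f : Nat) (acc : List Char), l.length ≤ f →
    PySem.Chars.replace.go [o] [n] f l acc = acc.reverse ++ l.map (fun c => if c = o then n else c) := by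
  intro l
  induction l with
  | nil => intro f acc _; cases f <;> simp [PySem.Chars.replace.go]
  | cons c t ih =>
    intro f acc hf
    cases f with
    | zero => simp at hf
    | succ f =>
      simp only [PySem.Chars.replace.go]
      by_cases h : o = c
      · subst h
        simp only [List.isPrefixOf, BEq.rfl, Bool.and_true, if_true, List.length_cons] at *
        simp only [List.reverse_singleton]
        rw [show List.drop (List.length ([] : List Char) + 1) (o :: t) = t from by simp]
        rw [ih f ([n] ++ acc) (by omega)]
        simp
      · rw [show ([o].isPrefixOf (c :: t)) = false by simp [List.isPrefixOf]; exact fun hh => h hh]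
        simp only [Bool.false_eq_true, if_false]
        rw [ih f (c :: acc) (by simp at hf; omega)]
        simp only [List.map_cons]
        rw [if_neg (fun hh => h hh.symm)]
        simp

lemma replace_single (o n : Char) (l : List Char) :
    PySem.Chars.replace l [o] [n] = l.map (fun c => if c = o then n else c) := by
  simp only [PySem.Chars.replace, List.isEmpty_cons, Bool.false_eq_true, if_false]
  rw [replace_go_single o n l l.length [] (le_refl _)]
  simp

-- the composed five-replacement map in one function
def pvRepl (c : Char) : Char :=
  if c = ',' ∨ c = '-' ∨ c = '_' ∨ c = '(' ∨ c = ')' then ' ' else c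

-- a simple structural splitter on one separator character (cur is the reversed current chunk)
def pvSplitSp (s : Char) : List Char → List Char → List (List Char)
  | [], cur => [cur.reverse]
  | c :: t, cur => if c = s then cur.reverse :: pvSplitSp s t [] else pvSplitSp s t (c :: cur)

lemma splitOn_go_single (s : Char) : ∀ (l : List Char) (f : Nat) (cur : List Char) (acc : List (List Char)),
    l.length < f →
    PySem.Chars.splitOn.go [s] f l cur acc = acc.reverse ++ pvSplitSp s l cur := by
  intro l
  induction l with
  | nil =>
    intro f cur acc hf
    cases f with
    | zero => omega
    | succ f => simp [PySem.Chars.splitOn.go, pvSplitSp]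
  | cons c t ih =>
    intro f cur acc hf
    cases f with
    | zero => omega
    | succ f =>
      simp only [PySem.Chars.splitOn.go, pvSplitSp]
      by_cases h : c = s
      · subst h
        rw [show ([c].isPrefixOf (c :: t)) = true by simp [List.isPrefixOf]]
        simp only [if_true]
        rw [show List.drop [c].length (c :: t) = t by simp]
        rw [ih f [] (cur.reverse :: acc) (by simp at hf; omega)]
        simp
      · rw [show ([s].isPrefixOf (c :: t)) = false by simp [List.isPrefixOf]; exact fun hh => h hh.symm]
        simp only [Bool.false_eq_true, if_false, if_neg h]
        exact ih f (c :: cur) acc (by simp at hf; omega)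

lemma splitOn_single (s : Char) (l : List Char) :
    PySem.Chars.splitOn l [s] = pvSplitSp s l [] := by
  simp only [PySem.Chars.splitOn]
  rw [splitOn_go_single s l (l.length + 1) [] [] (by omega)]
  simp

-- the five chained single-char replacements compose to pvRepl
lemma repl_chain (l : List Char) :
    ((((l.map (fun c => if c = ',' then ' ' else c)).map (fun c => if c = '-' then ' ' else c)).map
        (fun c => if c = '_' then ' ' else c)).map (fun c => if c = '(' then ' ' else c)).map
        (fun c => if c = ')' then ' ' else c) = l.map pvRepl := by
  simp only [List.map_map]
  apply List.map_congr_left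
  intro c _
  simp only [Function.comp, pvRepl]
  split_ifs <;> simp_all

-- B's scan produces exactly the nonempty chunks of the single-space split of the pvRepl image
lemma scan_eq_split : ∀ (l : List Char) (ws : List (List Char)) (buf : List Char),
    (l.foldl pvStep (ws, buf)).1 ++ (if (l.foldl pvStep (ws, buf)).2 ≠ [] then [(l.foldl pvStep (ws, buf)).2] else [])
      = ws ++ (pvSplitSp ' ' (l.map pvRepl) buf.reverse).filter (fun cs => cs ≠ []) := by
  intro l
  induction l with
  | nil =>
    intro ws buf
    simp only [List.foldl_nil, List.map_nil, pvSplitSp, List.reverse_reverse]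
    by_cases h : buf = [] <;> simp [h]
  | cons c t ih =>
    intro ws buf
    simp only [List.foldl_cons, List.map_cons]
    by_cases hs : pvIsSep c = true
    · have hr : pvRepl c = ' ' := by
        simp only [pvIsSep, Bool.or_eq_true, decide_eq_true_eq] at hs
        simp only [pvRepl]
        rcases hs with ((((h|h)|h)|h)|h)|h <;> simp [h]
      rw [hr]
      simp only [pvSplitSp, List.reverse_reverse]
      by_cases hb : buf = []
      · subst hb
        simp only [pvStep, hs, if_true, ne_eq, not_true_eq_false, if_false]
        rw [ih ws []]
        simp
      · simp only [pvStep, hs, if_true, ne_eq, hb, not_false_eq_true, if_true]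
        rw [ih (ws ++ [buf]) []]
        simp [hb]
    · have hc : c ≠ ' ' ∧ pvRepl c = c := by
        simp only [pvIsSep, Bool.or_eq_true, decide_eq_true_eq] at hs
        push Not at hs
        refine ⟨hs.2, ?_⟩
        simp only [pvRepl]
        rw [if_neg]
        tauto
      rw [hc.2]
      simp only [pvSplitSp, if_neg hc.1]
      simp only [pvStep, hs, Bool.false_eq_true, if_false]
      rw [ih ws (buf ++ [c])]
      simp

-- ===== VERDICT (by name: the statement is the Claim_ definition above) =====
theorem string_convert_to_search_spec : Claim_equal_string_convert_to_search := by
  intro str_inp flag_sort sort_order_up_ndown _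
  unfold Spec_string_convert_to_search string_convert_to_search string_convert_to_search_alt
  simp only [PySem.Str.replace, PySem.Str.lower, String.toList_ofList]
  rw [show (",".toList)=[','] from rfl, show ("-".toList)=['-'] from rfl,
      show ("_".toList)=['_'] from rfl, show ("(".toList)=['('] from rfl,
      show (")".toList)=[')'] from rfl, show ((" ".toList))=[' '] from rfl]
  rw [replace_single, replace_single, replace_single, replace_single, replace_single]
  rw [repl_chain]
  rw [splitOn_single]
  have hif : (fun (acc : List String) word => if 0 < PySem.Str.len word then acc ++ [word] else acc)
      = (fun acc word => if (decide (0 < PySem.Str.len word)) = true then acc ++ [id word] else acc) := by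
    funext acc w
    split <;> simp_all
  rw [hif, PySem.List.foldl_append_if (fun w => decide (0 < PySem.Str.len w)) id]
  have hfil : ((pvSplitSp ' ' ((PySem.Chars.lower str_inp.toList).map pvRepl) []).map String.ofList).filter
        (fun w => decide (0 < PySem.Str.len w))
      = ((pvSplitSp ' ' ((PySem.Chars.lower str_inp.toList).map pvRepl) []).filter (fun cs => cs ≠ [])).map
        String.ofList := by
    rw [List.filter_map]
    congr 1
    apply List.filter_congr
    intro cs _
    simp [PySem.Str.len, List.length_pos_iff]
  simp only [List.nil_append, hfil]
  rw [show ((PySem.Chars.lower str_inp.toList).foldl pvStep ([], []) : List (List Char) × List Char)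
      = ((PySem.Chars.lower str_inp.toList).foldl pvStep (([] : List (List Char)), ([] : List Char))) from rfl]
  have := scan_eq_split (PySem.Chars.lower str_inp.toList) [] []
  simp only [List.nil_append, List.reverse_nil] at this
  rw [← this]
  simp
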